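-- pv_equiv track=rewrite | github.com/kimjeongsoo20190147/algorithm | 프로그래머스/1/133499. 옹알이 （2）/옹알이 （2）.py | solution
-- ===== SOURCE A (Python) =====
-- def solution(babbling):
--     answer = 0
--
--     syllables = ["aya", "ye", "woo", "ma"]
--
--     for w in babbling:
--         i = 0
--         prev = ""
--         ok = True
--
--         while i < len(w):
--             matched = False
--             for s in syllables:
--                 if w.startswith(s, i) and s != prev:
--                     i += len(s)
--                     prev = s
--                     matched = True
--                     break
--
--             if not matched:
--                 ok = False
--                 break
--
--         if ok:
--             answer += 1
--
--     return answer
-- ===== SOURCE B (Python) =====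
-- def solution(babbling):
--     syllables = ("aya", "ye", "woo", "ma")
--
--     def ok(w, prev):
--         if w == "":
--             return True
--         return any(w.startswith(s) and s != prev and ok(w[len(s):], s)
--                    for s in syllables)
--
--     return sum(ok(w, "") for w in babbling)
-- ===== Notes on version B (the rewrite author's own statement) =====
-- stated objective: idiomatic
-- what changed: A's per-word while-loop with index/prev/ok/matched mutable state is replaced by a recursive backtracking predicate ok(w, prev) using any() over the syllables, summed with sum() over the words; the two agree because the four syllables start with four distinct letters.
import Mathlib
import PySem

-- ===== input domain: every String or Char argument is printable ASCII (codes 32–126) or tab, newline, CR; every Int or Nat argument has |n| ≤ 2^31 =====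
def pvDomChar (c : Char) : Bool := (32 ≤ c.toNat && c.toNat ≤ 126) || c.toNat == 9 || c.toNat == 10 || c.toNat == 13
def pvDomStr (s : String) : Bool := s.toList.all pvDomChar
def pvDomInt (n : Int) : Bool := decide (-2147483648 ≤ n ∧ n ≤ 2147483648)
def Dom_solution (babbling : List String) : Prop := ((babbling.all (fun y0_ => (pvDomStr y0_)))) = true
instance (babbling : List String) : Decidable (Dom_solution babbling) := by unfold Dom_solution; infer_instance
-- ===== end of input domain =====

-- B replaces A's greedy index/flag while-loop by a recursive backtracking decomposition
-- check summed over the words (objective: idiomatic); same return values, no speed claim.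


-- ===== PORT A =====
-- w.startswith(s, i) with 0 ≤ i (i only ever grows from 0): exact as prefix test on the drop
def startsWithAt (w : List Char) (s : String) (i : Nat) : Bool :=
  s.toList.isPrefixOf (w.drop i)

-- the while-loop of A: inner `for s in syllables: … break` transliterated as the
-- first-match if-chain in the same order; state = (i, prev); `matched=False` exit = false
def whileA (w : List Char) (i : Nat) (prev : String) : Bool :=
  if i < w.length then
    if startsWithAt w "aya" i && !("aya" == prev) then whileA w (i + 3) "aya"
    else if startsWithAt w "ye" i && !("ye" == prev) then whileA w (i + 2) "ye"
    else if startsWithAt w "woo" i && !("woo" == prev) then whileA w (i + 3) "woo"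
    else if startsWithAt w "ma" i && !("ma" == prev) then whileA w (i + 2) "ma"
    else false
  else true
termination_by w.length - i

def solution (babbling : List String) : Int :=
  babbling.foldl (fun answer w => if whileA w.toList 0 "" then answer + 1 else answer) 0

-- ===== PORT B =====
-- Source B's ok(w, prev): backtracking recursion; any(...) over the four syllables in order
def okB (w : List Char) (prev : String) : Bool :=
  if h : w = [] then true
  else
    ("aya".toList.isPrefixOf w && !("aya" == prev) && okB (w.drop 3) "aya") ||
    ("ye".toList.isPrefixOf w && !("ye" == prev) && okB (w.drop 2) "ye") ||
    ("woo".toList.isPrefixOf w && !("woo" == prev) && okB (w.drop 3) "woo") ||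
    ("ma".toList.isPrefixOf w && !("ma" == prev) && okB (w.drop 2) "ma")
termination_by w.length
decreasing_by all_goals
  (have := List.length_pos_of_ne_nil h; simp only [List.length_drop]; omega)

def solution_alt (babbling : List String) : Int :=
  (babbling.map (fun w => if okB w.toList "" then (1 : Int) else 0)).sum

-- ===== PRECONDITION & SPEC =====
def Spec_solution (babbling : List String) (out : Int) : Prop := out = solution_alt babbling
instance (babbling : List String) (out : Int) : Decidable (Spec_solution babbling out) := by unfold Spec_solution; infer_instance

-- ===== CLAIM (what is proved, stated in full; the proofs are below) =====
def Claim_equal_solution : Prop := ∀ (babbling : List String), Dom_solution babbling → Spec_solution babbling (solution babbling)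

-- ===== LEMMAS AND PROOFS =====

theorem whileA_eq_okB (n : Nat) : ∀ (w : List Char) (i : Nat) (prev : String),
    w.length - i ≤ n → whileA w i prev = okB (w.drop i) prev := by
  induction n with
  | zero =>
    intro w i prev h
    have hi : w.length ≤ i := by omega
    rw [whileA, okB]
    simp [List.drop_eq_nil_of_le hi, Nat.not_lt.mpr hi]
  | succ n ih =>
    intro w i prev h
    rw [whileA]
    by_cases hi : i < w.length
    · simp only [if_pos hi]
      have hne : w.drop i ≠ [] := by
        simp [List.drop_eq_nil_iff]; omega
      obtain ⟨c, t, hct⟩ := List.exists_cons_of_ne_nil hne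
      rw [okB, dif_neg hne]
      have hdd : ∀ k, (w.drop i).drop k = w.drop (i + k) := by
        intro k; rw [List.drop_drop]; try ring_nf
      have hrec : ∀ (k : Nat) (p : String), 1 ≤ k → whileA w (i + k) p = okB ((w.drop i).drop k) p := by
        intro k p hk
        rw [hdd]
        exact ih w (i + k) p (by omega)
      have hsw : ∀ s : String, startsWithAt w s i = s.toList.isPrefixOf (w.drop i) := by
        intro s; rw [startsWithAt]
      simp only [hsw, hct]
      have hhead : ∀ (s : Char) (l : List Char), s ≠ c → ¬ ((s :: l) <+: (c :: t)) := by
        intro s l hs hpre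
        rw [List.cons_prefix_cons] at hpre
        exact hs hpre.1
      by_cases ha : c = 'a'
      · subst ha
        have hr := hrec 3 "aya" (by omega); rw [hct] at hr
        by_cases hp : (['a','y','a'] : List Char) <+: ('a' :: t)
        · have hp' := (List.cons_prefix_cons.mp hp).2
          by_cases hv : ("aya" : String) = prev
          · rw [Bool.eq_iff_iff]
            simp [List.isPrefixOf_iff_prefix, hp', hv, hhead 'y' ['e'] (by decide), hhead 'w' ['o','o'] (by decide), hhead 'm' ['a'] (by decide)]
          · rw [Bool.eq_iff_iff]
            simp [List.isPrefixOf_iff_prefix, hp', hv, hr, hhead 'y' ['e'] (by decide), hhead 'w' ['o','o'] (by decide), hhead 'm' ['a'] (by decide)]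
        · have hp' : ¬((['y','a'] : List Char) <+: t) := fun hq => hp (List.cons_prefix_cons.mpr ⟨rfl, hq⟩)
          rw [Bool.eq_iff_iff]
          simp [List.isPrefixOf_iff_prefix, hp', hhead 'y' ['e'] (by decide), hhead 'w' ['o','o'] (by decide), hhead 'm' ['a'] (by decide)]
      · by_cases hy : c = 'y'
        · subst hy
          have hr := hrec 2 "ye" (by omega); rw [hct] at hr
          by_cases hp : (['y','e'] : List Char) <+: ('y' :: t)
          · have hp' := (List.cons_prefix_cons.mp hp).2
            by_cases hv : ("ye" : String) = prev
            · rw [Bool.eq_iff_iff]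
              simp [List.isPrefixOf_iff_prefix, hp', hv, hhead 'a' ['y','a'] (by decide), hhead 'w' ['o','o'] (by decide), hhead 'm' ['a'] (by decide)]
            · rw [Bool.eq_iff_iff]
              simp [List.isPrefixOf_iff_prefix, hp', hv, hr, hhead 'a' ['y','a'] (by decide), hhead 'w' ['o','o'] (by decide), hhead 'm' ['a'] (by decide)]
          · have hp' : ¬((['e'] : List Char) <+: t) := fun hq => hp (List.cons_prefix_cons.mpr ⟨rfl, hq⟩)
            rw [Bool.eq_iff_iff]
            simp [List.isPrefixOf_iff_prefix, hp', hhead 'a' ['y','a'] (by decide), hhead 'w' ['o','o'] (by decide), hhead 'm' ['a'] (by decide)]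
        · by_cases hw : c = 'w'
          · subst hw
            have hr := hrec 3 "woo" (by omega); rw [hct] at hr
            by_cases hp : (['w','o','o'] : List Char) <+: ('w' :: t)
            · have hp' := (List.cons_prefix_cons.mp hp).2
              by_cases hv : ("woo" : String) = prev
              · rw [Bool.eq_iff_iff]
                simp [List.isPrefixOf_iff_prefix, hp', hv, hhead 'a' ['y','a'] (by decide), hhead 'y' ['e'] (by decide), hhead 'm' ['a'] (by decide)]
              · rw [Bool.eq_iff_iff]
                simp [List.isPrefixOf_iff_prefix, hp', hv, hr, hhead 'a' ['y','a'] (by decide), hhead 'y' ['e'] (by decide), hhead 'm' ['a'] (by decide)]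
            · have hp' : ¬((['o','o'] : List Char) <+: t) := fun hq => hp (List.cons_prefix_cons.mpr ⟨rfl, hq⟩)
              rw [Bool.eq_iff_iff]
              simp [List.isPrefixOf_iff_prefix, hp', hhead 'a' ['y','a'] (by decide), hhead 'y' ['e'] (by decide), hhead 'm' ['a'] (by decide)]
          · by_cases hm : c = 'm'
            · subst hm
              have hr := hrec 2 "ma" (by omega); rw [hct] at hr
              by_cases hp : (['m','a'] : List Char) <+: ('m' :: t)
              · have hp' := (List.cons_prefix_cons.mp hp).2
                by_cases hv : ("ma" : String) = prev
                · rw [Bool.eq_iff_iff]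
                  simp [List.isPrefixOf_iff_prefix, hp', hv, hhead 'a' ['y','a'] (by decide), hhead 'y' ['e'] (by decide), hhead 'w' ['o','o'] (by decide)]
                · rw [Bool.eq_iff_iff]
                  simp [List.isPrefixOf_iff_prefix, hp', hv, hr, hhead 'a' ['y','a'] (by decide), hhead 'y' ['e'] (by decide), hhead 'w' ['o','o'] (by decide)]
              · have hp' : ¬((['a'] : List Char) <+: t) := fun hq => hp (List.cons_prefix_cons.mpr ⟨rfl, hq⟩)
                rw [Bool.eq_iff_iff]
                simp [List.isPrefixOf_iff_prefix, hp', hhead 'a' ['y','a'] (by decide), hhead 'y' ['e'] (by decide), hhead 'w' ['o','o'] (by decide)]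
            · rw [Bool.eq_iff_iff]
              simp [List.isPrefixOf_iff_prefix, hhead 'a' ['y','a'] (Ne.symm ha),
                hhead 'y' ['e'] (Ne.symm hy), hhead 'w' ['o','o'] (Ne.symm hw),
                hhead 'm' ['a'] (Ne.symm hm)]
    · simp only [if_neg hi]
      have hle : w.length ≤ i := by omega
      rw [okB]
      simp [List.drop_eq_nil_of_le hle]

theorem word_eq (w : String) : whileA w.toList 0 "" = okB w.toList "" := by
  simpa using whileA_eq_okB w.toList.length w.toList 0 "" (by omega)

theorem fold_eq (l : List String) (a : Int) :
    l.foldl (fun answer w => if whileA w.toList 0 "" then answer + 1 else answer) a =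
    a + (l.map (fun w => if okB w.toList "" then (1 : Int) else 0)).sum := by
  induction l generalizing a with
  | nil => simp
  | cons x xs ih =>
    simp only [List.foldl_cons, List.map_cons, List.sum_cons, word_eq x, ih]
    by_cases h : okB x.toList ""
    · simp [h]; ring
    · simp [h]

-- ===== VERDICT (by name: the statement is the Claim_ definition above) =====
theorem solution_spec : Claim_equal_solution := by
  intro babbling _
  unfold Spec_solution solution solution_alt
  simpa using fold_eq babbling 0
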